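-- pv_equiv track=rewrite | github.com/ScopeFoundry/ScopeFoundry | sweeping/sweep_2D_modes.py | mk_indices_gen
-- ===== SOURCE A (Python) =====
-- def mk_indices_gen(ar_1, ar_2, mode="nested"):
--     if mode == "nested":
--         for k, v in enumerate(ar_1):
--             for l, v in enumerate(ar_2):
--                 yield k, l
--
--     elif mode == "nested_swap_order":
--         for l, lv in enumerate(ar_2):
--             for k, kv in enumerate(ar_1):
--                 yield k, l
--
--     elif mode == "co-move":
--         for l, v in enumerate(ar_2):
--             yield 0, l
--
--     elif mode == "serpentine":
--         for k, v in enumerate(ar_1):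
--             if k % 2 == 0:
--                 for l, v in enumerate(ar_2):
--                     yield k, l
--             else:
--                 for l, v in reversed(list(enumerate(ar_2))):
--                     yield k, l
--
--     elif mode == "serpentine_swap_order":
--         for l, v in enumerate(ar_2):
--             if l % 2 == 0:
--                 for k, v in enumerate(ar_1):
--                     yield k, l
--             else:
--                 for k, v in reversed(list(enumerate(ar_1))):
--                     yield k, l
-- ===== SOURCE B (Python) =====
-- def mk_indices_gen(ar_1, ar_2, mode="nested"):
--     n1, n2 = len(ar_1), len(ar_2)
--     if mode == "nested":
--         for i in range(n1 * n2):
--             yield divmod(i, n2)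
--     elif mode == "nested_swap_order":
--         for i in range(n2 * n1):
--             l, k = divmod(i, n1)
--             yield k, l
--     elif mode == "co-move":
--         for l in range(n2):
--             yield 0, l
--     elif mode == "serpentine":
--         for i in range(n1 * n2):
--             k, j = divmod(i, n2)
--             yield k, (n2 - 1 - j if k % 2 else j)
--     elif mode == "serpentine_swap_order":
--         for i in range(n2 * n1):
--             l, j = divmod(i, n1)
--             yield (n1 - 1 - j if l % 2 else j), l
-- ===== Notes on version B (the rewrite author's own statement) =====
-- stated objective: alternative
-- what changed: Each mode's nested enumerate loops (and the reversed-list materialization for serpentine rows) are replaced by a single flat loop over range(n_outer*n_inner) that recovers both indices with divmod and flips the inner index arithmetically on odd outer rows.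
import Mathlib
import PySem

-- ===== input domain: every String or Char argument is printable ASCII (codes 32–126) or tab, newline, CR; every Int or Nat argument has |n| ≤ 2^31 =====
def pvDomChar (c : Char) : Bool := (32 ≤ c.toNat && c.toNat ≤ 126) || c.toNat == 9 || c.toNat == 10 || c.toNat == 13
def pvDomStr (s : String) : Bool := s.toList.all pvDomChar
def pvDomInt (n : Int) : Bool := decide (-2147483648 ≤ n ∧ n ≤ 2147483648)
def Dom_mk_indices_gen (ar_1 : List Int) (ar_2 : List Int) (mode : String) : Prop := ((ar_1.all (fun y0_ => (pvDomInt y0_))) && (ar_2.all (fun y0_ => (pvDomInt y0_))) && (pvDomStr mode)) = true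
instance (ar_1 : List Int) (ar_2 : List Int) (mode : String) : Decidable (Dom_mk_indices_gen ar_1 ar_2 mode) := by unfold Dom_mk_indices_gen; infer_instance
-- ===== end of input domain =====

-- B replaces A's per-mode nested loops over enumerate() with a single flat loop over
-- range(n_outer*n_inner) using divmod index arithmetic (objective: alternative decomposition).


-- ===== PORT A =====
-- A is a generator; the port collects the yielded pairs in order.
def mk_indices_gen (ar_1 : List Int) (ar_2 : List Int) (mode : String) : List (Int × Int) :=
  if mode = "nested" then
    (PySem.List.enumerate ar_1).foldl (fun acc kv =>
      (PySem.List.enumerate ar_2).foldl (fun acc2 lv => acc2 ++ [(kv.1, lv.1)]) acc) []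
  else if mode = "nested_swap_order" then
    (PySem.List.enumerate ar_2).foldl (fun acc lv =>
      (PySem.List.enumerate ar_1).foldl (fun acc2 kv => acc2 ++ [(kv.1, lv.1)]) acc) []
  else if mode = "co-move" then
    (PySem.List.enumerate ar_2).foldl (fun acc lv => acc ++ [((0 : Int), lv.1)]) []
  else if mode = "serpentine" then
    (PySem.List.enumerate ar_1).foldl (fun acc kv =>
      if PySem.Int.mod kv.1 2 = 0 then
        (PySem.List.enumerate ar_2).foldl (fun acc2 lv => acc2 ++ [(kv.1, lv.1)]) acc
      else
        ((PySem.List.enumerate ar_2).reverse).foldl (fun acc2 lv => acc2 ++ [(kv.1, lv.1)]) acc) []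
  else if mode = "serpentine_swap_order" then
    (PySem.List.enumerate ar_2).foldl (fun acc lv =>
      if PySem.Int.mod lv.1 2 = 0 then
        (PySem.List.enumerate ar_1).foldl (fun acc2 kv => acc2 ++ [(kv.1, lv.1)]) acc
      else
        ((PySem.List.enumerate ar_1).reverse).foldl (fun acc2 kv => acc2 ++ [(kv.1, lv.1)]) acc) []
  else []

-- ===== PORT B =====
-- Transliteration of Source B: one flat range over n_outer*n_inner, indices recovered by divmod.
-- divmod(i, d) is ported as (PySem.Int.floordiv i d, PySem.Int.mod i d); the loop body only
-- runs when the range is nonempty, which forces d > 0, exactly as in Python.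
def mk_indices_gen_alt (ar_1 : List Int) (ar_2 : List Int) (mode : String) : List (Int × Int) :=
  let n1 : Int := ar_1.length
  let n2 : Int := ar_2.length
  if mode = "nested" then
    (PySem.List.pyRange 0 (n1 * n2) 1).foldl (fun acc i =>
      acc ++ [(PySem.Int.floordiv i n2, PySem.Int.mod i n2)]) []
  else if mode = "nested_swap_order" then
    (PySem.List.pyRange 0 (n2 * n1) 1).foldl (fun acc i =>
      acc ++ [(PySem.Int.mod i n1, PySem.Int.floordiv i n1)]) []
  else if mode = "co-move" then
    (PySem.List.pyRange 0 n2 1).foldl (fun acc l => acc ++ [((0 : Int), l)]) []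
  else if mode = "serpentine" then
    (PySem.List.pyRange 0 (n1 * n2) 1).foldl (fun acc i =>
      acc ++ [(PySem.Int.floordiv i n2,
               if PySem.Int.mod (PySem.Int.floordiv i n2) 2 ≠ 0 then n2 - 1 - PySem.Int.mod i n2
               else PySem.Int.mod i n2)]) []
  else if mode = "serpentine_swap_order" then
    (PySem.List.pyRange 0 (n2 * n1) 1).foldl (fun acc i =>
      acc ++ [((if PySem.Int.mod (PySem.Int.floordiv i n1) 2 ≠ 0 then n1 - 1 - PySem.Int.mod i n1
                else PySem.Int.mod i n1),
               PySem.Int.floordiv i n1)]) []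
  else []

-- ===== PRECONDITION & SPEC =====
def Spec_mk_indices_gen (ar_1 : List Int) (ar_2 : List Int) (mode : String) (out : List (Int × Int)) : Prop := out = mk_indices_gen_alt ar_1 ar_2 mode
instance (ar_1 : List Int) (ar_2 : List Int) (mode : String) (out : List (Int × Int)) : Decidable (Spec_mk_indices_gen ar_1 ar_2 mode out) := by unfold Spec_mk_indices_gen; infer_instance

-- ===== CLAIM (what is proved, stated in full; the proofs are below) =====
def Claim_equal_mk_indices_gen : Prop := ∀ (ar_1 : List Int) (ar_2 : List Int) (mode : String), Dom_mk_indices_gen ar_1 ar_2 mode → Spec_mk_indices_gen ar_1 ar_2 mode (mk_indices_gen ar_1 ar_2 mode)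

-- ===== LEMMAS AND PROOFS =====

-- canonical row-major form both ports are reduced to
def pvCanon {α : Type} (a b : Nat) (f : Nat → Nat → α) : List α :=
  (List.range a).flatMap (fun k => (List.range b).map (fun l => f k l))

theorem pvCanon_succ {α : Type} (a b : Nat) (f : Nat → Nat → α) :
    pvCanon (a + 1) b f = pvCanon a b f ++ (List.range b).map (f a) := by
  unfold pvCanon
  simp [List.range_succ]

-- B-side shape: a flat range over a*b with divmod is the canonical double loop
theorem range_mul_divmod {α : Type} (a b : Nat) (F : Nat → Nat → α) :
    (List.range (a * b)).map (fun n => F (n / b) (n % b)) = pvCanon a b F := by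
  rcases Nat.eq_zero_or_pos b with hb | hb
  · subst hb; simp [pvCanon]
  · induction a with
    | zero => simp [pvCanon]
    | succ a ih =>
      rw [Nat.succ_mul, List.range_add, List.map_append, List.map_map, ih, pvCanon_succ]
      refine congrArg (pvCanon a b F ++ ·) (List.map_congr_left ?_)
      intro l hl
      have hlb : l < b := List.mem_range.mp hl
      have h1 : (a * b + l) / b = a := by
        rw [Nat.mul_comm a b, Nat.mul_add_div hb, Nat.div_eq_of_lt hlb]
        omega
      have h2 : (a * b + l) % b = l := by
        rw [Nat.mul_comm a b, Nat.mul_add_mod, Nat.mod_eq_of_lt hlb]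
      simp [Function.comp, h1, h2]

theorem pyRange_mul_divmod {α : Type} (a b : Nat) (f : Int → Int → α) :
    (PySem.List.pyRange 0 ((a : Int) * (b : Int)) 1).map
        (fun i => f (PySem.Int.floordiv i b) (PySem.Int.mod i b)) =
      pvCanon a b (fun k l => f k l) := by
  rw [show ((a : Int) * (b : Int)) = ((a * b : Nat) : Int) by push_cast; ring,
      PySem.List.pyRange_zero_natCast, List.map_map]
  rw [← range_mul_divmod a b (fun k l => f k l)]
  refine List.map_congr_left fun n _ => ?_
  simp [Function.comp, PySem.Int.floordiv_natCast, PySem.Int.mod_natCast]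

-- A-side shapes: maps / flatMaps over enumerate that only use the index
theorem enum_map {α β : Type} (xs : List α) (g : Int → β) :
    (PySem.List.enumerate xs).map (fun p => g p.1)
      = (List.range xs.length).map (fun (k : Nat) => g (k : Int)) := by
  have h : (fun p : Int × α => g p.1) = g ∘ (fun p : Int × α => p.1) := rfl
  rw [h, ← List.map_map, PySem.List.map_fst_enumerate]
  rw [show ((0 : Int) + (xs.length : Int)) = (xs.length : Int) by ring]
  rw [PySem.List.pyRange_zero_natCast, List.map_map]
  rfl

theorem enum_flatMap {α β : Type} (xs : List α) (h : Int → List β) :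
    (PySem.List.enumerate xs).flatMap (fun p => h p.1)
      = (List.range xs.length).flatMap (fun (k : Nat) => h (k : Int)) := by
  have e : (PySem.List.enumerate xs).flatMap (fun p => h p.1)
      = ((PySem.List.enumerate xs).map (fun p : Int × α => p.1)).flatMap h := by
    rw [List.flatMap_map]
  rw [e, PySem.List.map_fst_enumerate]
  rw [show ((0 : Int) + (xs.length : Int)) = (xs.length : Int) by ring]
  rw [PySem.List.pyRange_zero_natCast, List.flatMap_map]

theorem range_reverse_map {α : Type} (b : Nat) (g : Nat → α) :
    (List.range b).reverse.map g = (List.range b).map (fun l => g (b - 1 - l)) := by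
  rw [List.range_eq_range', List.reverse_range', List.map_map, ← List.range_eq_range']
  refine List.map_congr_left fun l _ => ?_
  refine congrArg g ?_
  show 0 + b - 1 - l = b - 1 - l
  omega

-- push a branch on the element through an accumulating loop
theorem foldl_if_append {α β : Type} (p : α → Prop) [DecidablePred p]
    (g h : α → List β) (l : List α) (acc : List β) :
    l.foldl (fun acc x => if p x then acc ++ g x else acc ++ h x) acc
      = acc ++ l.flatMap (fun x => if p x then g x else h x) := by
  induction l generalizing acc with
  | nil => simp
  | cons x xs ih =>
    simp only [List.foldl_cons, List.flatMap_cons, ih]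
    split <;> simp

theorem ite_map {α β : Type} (c : Prop) [Decidable c] (f g : α → β) (xs : List α) :
    (if c then xs.map f else xs.map g) = xs.map (fun x => if c then f x else g x) := by
  split <;> rfl

theorem mod_cast_two (k : Nat) : PySem.Int.mod (k : Int) 2 = ((k % 2 : Nat) : Int) := by
  rw [PySem.Int.mod_eq_emod_of_pos (by norm_num)]
  omega

theorem mk_indices_gen_spec : Claim_equal_mk_indices_gen := by
  intro ar_1 ar_2 mode _
  unfold Spec_mk_indices_gen
  simp only [mk_indices_gen, mk_indices_gen_alt]
  split_ifs
  case pos =>  -- nested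
    simp only [PySem.List.foldl_append_singleton_eq_map, PySem.List.foldl_append_eq_flatMap,
      List.nil_append]
    refine Eq.trans (Eq.trans
      (enum_flatMap ar_1 (fun k => (PySem.List.enumerate ar_2).map (fun p => (k, p.1)))) ?_)
      (pyRange_mul_divmod ar_1.length ar_2.length (fun k l => (k, l))).symm
    unfold pvCanon
    exact List.flatMap_congr fun k _ => enum_map ar_2 (fun l => ((k : Int), l))
  case pos =>  -- nested_swap_order
    simp only [PySem.List.foldl_append_singleton_eq_map, PySem.List.foldl_append_eq_flatMap,
      List.nil_append]
    refine Eq.trans (Eq.trans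
      (enum_flatMap ar_2 (fun l => (PySem.List.enumerate ar_1).map (fun p => (p.1, l)))) ?_)
      (pyRange_mul_divmod ar_2.length ar_1.length (fun l k => (k, l))).symm
    unfold pvCanon
    exact List.flatMap_congr fun l _ => enum_map ar_1 (fun k => (k, (l : Int)))
  case pos =>  -- co-move
    simp only [PySem.List.foldl_append_singleton_eq_map, List.nil_append]
    rw [enum_map ar_2 (fun l => ((0 : Int), l)), PySem.List.pyRange_zero_natCast, List.map_map]
    rfl
  case pos =>  -- serpentine
    simp only [PySem.List.foldl_append_singleton_eq_map]
    rw [foldl_if_append]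
    simp only [List.nil_append]
    refine Eq.trans (Eq.trans
      (enum_flatMap ar_1 (fun k =>
        if PySem.Int.mod k 2 = 0 then (PySem.List.enumerate ar_2).map (fun p => (k, p.1))
        else ((PySem.List.enumerate ar_2).reverse).map (fun p => (k, p.1)))) ?_)
      (pyRange_mul_divmod ar_1.length ar_2.length
        (fun k l => (k, if PySem.Int.mod k 2 ≠ 0 then (ar_2.length : Int) - 1 - l else l))).symm
    unfold pvCanon
    refine List.flatMap_congr fun k _ => ?_
    rw [enum_map ar_2 (fun l => ((k : Int), l)), List.map_reverse,
        enum_map ar_2 (fun l => ((k : Int), l)), ← List.map_reverse, range_reverse_map, ite_map]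
    refine List.map_congr_left fun l hl => ?_
    have hlb : l < ar_2.length := List.mem_range.mp hl
    rw [mod_cast_two]
    rcases Nat.mod_two_eq_zero_or_one k with h2 | h2
    · simp [h2]
      omega
    · simp [h2]
      omega
  case pos =>  -- serpentine_swap_order
    simp only [PySem.List.foldl_append_singleton_eq_map]
    rw [foldl_if_append]
    simp only [List.nil_append]
    refine Eq.trans (Eq.trans
      (enum_flatMap ar_2 (fun l =>
        if PySem.Int.mod l 2 = 0 then (PySem.List.enumerate ar_1).map (fun p => (p.1, l))
        else ((PySem.List.enumerate ar_1).reverse).map (fun p => (p.1, l)))) ?_)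
      (pyRange_mul_divmod ar_2.length ar_1.length
        (fun l k => ((if PySem.Int.mod l 2 ≠ 0 then (ar_1.length : Int) - 1 - k else k), l))).symm
    unfold pvCanon
    refine List.flatMap_congr fun l _ => ?_
    rw [enum_map ar_1 (fun k => (k, (l : Int))), List.map_reverse,
        enum_map ar_1 (fun k => (k, (l : Int))), ← List.map_reverse, range_reverse_map, ite_map]
    refine List.map_congr_left fun k hk => ?_
    have hkb : k < ar_1.length := List.mem_range.mp hk
    rw [mod_cast_two]
    rcases Nat.mod_two_eq_zero_or_one l with h2 | h2
    · simp [h2]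
      omega
    · simp [h2]
      omega
  case neg => rfl
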